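-- pv_equiv track=rewrite | github.com/nerdbarbie/ranchcogs | username_guard/username_guard.py | _truncated_list
-- ===== SOURCE A (Python) =====
-- _LIST_TRUNCATE_AT = 1800
--
-- def _truncated_list(lines: list[str], limit: int = _LIST_TRUNCATE_AT) -> str:
--     """
--     Join *lines* with newlines.  If the result would exceed *limit* chars,
--     truncate and append a '… (N more)' notice so we never exceed Discord's
--     2 000-character message cap.
--     """
--     out: list[str] = []
--     total = 0
--     for i, line in enumerate(lines):
--         # +1 for the newline separator
--         if total + len(line) + 1 > limit:
--             remaining = len(lines) - i
--             out.append(f"… *({remaining} more — too many to display)*")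
--             break
--         out.append(line)
--         total += len(line) + 1
--     return "\n".join(out)
-- ===== SOURCE B (Python) =====
-- _LIST_TRUNCATE_AT = 1800
--
-- def _truncated_list(lines: list[str], limit: int = _LIST_TRUNCATE_AT) -> str:
--     """Divide-and-conquer: find the cutoff (the largest k such that the first
--     k lines cost at most `limit` characters, counting len(line)+1 each) by
--     recursive bisection of the list, then assemble the result once.  Correct
--     because per-line costs are strictly positive, so prefix costs are strictly
--     increasing: if the left half fits entirely, the cutoff lies in the right
--     half with the budget reduced by the left half's cost; otherwise it lies in
--     the left half."""
--
--     def cost(seg: list[str]) -> int: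
--         return sum(len(s) + 1 for s in seg)
--
--     def cutoff(seg: list[str], budget: int) -> int:
--         if not seg:
--             return 0
--         if len(seg) == 1:
--             return 1 if len(seg[0]) + 1 <= budget else 0
--         mid = len(seg) // 2
--         c = cost(seg[:mid])
--         if c <= budget:
--             return mid + cutoff(seg[mid:], budget - c)
--         return cutoff(seg[:mid], budget)
--
--     k = cutoff(lines, limit)
--     if k == len(lines):
--         return "\n".join(lines)
--     return "\n".join(lines[:k] + [f"… *({len(lines) - k} more — too many to display)*"])
-- ===== Notes on version B (the rewrite author's own statement) =====
-- stated objective: alternative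
-- what changed: A accumulates kept lines in one left-to-right loop with a running total and breaks at the first overflow; B locates the cutoff index by recursive divide-and-conquer bisection of the list (descend left or right by comparing the left half's total cost to the remaining budget) and then assembles the output once by slicing.
import Mathlib
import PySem

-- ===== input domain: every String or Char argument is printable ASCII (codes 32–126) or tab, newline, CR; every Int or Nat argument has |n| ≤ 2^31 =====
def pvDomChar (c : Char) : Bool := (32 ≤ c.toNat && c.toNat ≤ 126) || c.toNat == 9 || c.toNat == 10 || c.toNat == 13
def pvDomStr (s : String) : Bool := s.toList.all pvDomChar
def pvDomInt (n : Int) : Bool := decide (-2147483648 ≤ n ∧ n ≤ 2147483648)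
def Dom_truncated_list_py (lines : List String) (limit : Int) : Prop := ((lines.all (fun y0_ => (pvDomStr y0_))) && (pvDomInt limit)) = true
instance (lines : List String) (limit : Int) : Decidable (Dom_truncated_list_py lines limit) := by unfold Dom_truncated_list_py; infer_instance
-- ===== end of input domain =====

-- B replaces A's single break-out accumulation loop by a divide-and-conquer
-- bisection that locates the cutoff index, then assembles the output once;
-- objective: alternative.

-- the f-string notice "… *({r} more — too many to display)*", shared verbatim by both sources
def pvNotice (r : Int) : String :=
  "… *(" ++ PySem.Int.toStr r ++ " more — too many to display)*"

-- ===== PORT A =====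
-- A's for-loop over enumerate(lines) with running total and break
def pvALoop (limit n : Int) : List String → Int → Int → List String
  | [], _, _ => []
  | line :: rest, i, total =>
    if total + PySem.Str.len line + 1 > limit then
      [pvNotice (n - i)]
    else
      line :: pvALoop limit n rest (i + 1) (total + PySem.Str.len line + 1)

def truncated_list_py (lines : List String) (limit : Int) : String :=
  PySem.Str.join "\n" (pvALoop limit (PySem.List.len lines) lines 0 0)

-- ===== PORT B =====
-- Source B's helper cost(seg) = sum(len(s) + 1 for s in seg)
def pvCost : List String → Int
  | [] => 0
  | s :: rest => PySem.Str.len s + 1 + pvCost rest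

-- Source B's recursive bisection cutoff(seg, budget); Python's len(seg)//2 on a
-- nonnegative length is Nat division, and the result (a count) is a Nat here
def pvCutoff : List String → Int → Nat
  | [], _ => 0
  | [x], budget => if PySem.Str.len x + 1 ≤ budget then 1 else 0
  | a :: b :: rest, budget =>
    let seg := a :: b :: rest
    let mid := seg.length / 2
    let c := pvCost (seg.take mid)
    if c ≤ budget then mid + pvCutoff (seg.drop mid) (budget - c)
    else pvCutoff (seg.take mid) budget
termination_by seg _ => seg.length
decreasing_by
  · simp only [List.length_drop, List.length_cons]; omega
  · simp only [List.length_take, List.length_cons]; omega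

def truncated_list_py_alt (lines : List String) (limit : Int) : String :=
  let k := pvCutoff lines limit
  if k = lines.length then
    PySem.Str.join "\n" lines
  else
    PySem.Str.join "\n" (lines.take k ++ [pvNotice (PySem.List.len lines - k)])

-- ===== PRECONDITION & SPEC =====
def Spec_truncated_list_py (lines : List String) (limit : Int) (out : String) : Prop := out = truncated_list_py_alt lines limit
instance (lines : List String) (limit : Int) (out : String) : Decidable (Spec_truncated_list_py lines limit out) := by unfold Spec_truncated_list_py; infer_instance

-- ===== CLAIM (what is proved, stated in full; the proofs are below) =====
def Claim_equal_truncated_list_py : Prop := ∀ (lines : List String) (limit : Int), Dom_truncated_list_py lines limit → Spec_truncated_list_py lines limit (truncated_list_py lines limit)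

-- ===== LEMMAS AND PROOFS =====

-- the cumulative costs c_i = sum of (len+1) over lines[0..i], starting from t
def pvCum (t : Int) : List String → List Int
  | [] => []
  | line :: rest => (t + PySem.Str.len line + 1) :: pvCum (t + PySem.Str.len line + 1) rest

-- every cumulative cost is strictly above the starting total
lemma pvCum_gt : ∀ (r : List String) (t : Int), ∀ x ∈ pvCum t r, t < x := by
  intro r
  induction r with
  | nil => intro t x hx; simp [pvCum] at hx
  | cons l rest ih =>
    intro t x hx
    simp only [pvCum, List.mem_cons] at hx
    have hlen : (0 : Int) ≤ PySem.Str.len l := by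
      simp [PySem.Str.len_eq]
    rcases hx with h | h
    · omega
    · have := ih (t + PySem.Str.len l + 1) x h
      omega

-- A's loop equals the cutoff computed from the prefix sums
lemma pvALoop_eq (limit n : Int) : ∀ (rest : List String) (i t : Int),
    pvALoop limit n rest i t =
      (let k := (pvCum t rest).countP (fun c => decide (c ≤ limit));
       if k = rest.length then rest
       else rest.take k ++ [pvNotice (n - (i + k))]) := by
  intro rest
  induction rest with
  | nil => intro i t; simp [pvALoop, pvCum]
  | cons line r ih =>
    intro i t
    simp only [pvALoop, pvCum, PySem.Str.len_eq]
    by_cases h : t + (line.toList.length : Int) + 1 > limit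
    · -- the head already overflows: no later prefix fits either
      have hzero : ((t + (line.toList.length : Int) + 1) ::
          pvCum (t + (line.toList.length : Int) + 1) r).countP (fun c => decide (c ≤ limit)) = 0 := by
        apply List.countP_eq_zero.mpr
        intro x hx
        simp only [List.mem_cons] at hx
        rcases hx with rfl | hx
        · simp only [decide_eq_true_eq]; omega
        · have := pvCum_gt r (t + (line.toList.length : Int) + 1) x hx
          simp only [decide_eq_true_eq]; omega
      simp only [if_pos h, hzero]
      have hne : (0 : Nat) ≠ r.length + 1 := by omega
      simp
    · -- the head fits: count is one more, recurse
      have hc : (decide (t + (line.toList.length : Int) + 1 ≤ limit)) = true := by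
        simp only [decide_eq_true_eq]; omega
      simp only [if_neg h, List.countP_cons, hc, if_pos]
      rw [ih (i + 1) (t + (line.toList.length : Int) + 1)]
      simp only [List.length_cons]
      set k := (pvCum (t + (line.toList.length : Int) + 1) r).countP (fun c => decide (c ≤ limit)) with hkdef
      by_cases hk : k = r.length
      · simp [hk]
      · have hk' : k + 1 ≠ r.length + 1 := by omega
        simp only [if_neg hk, if_neg hk', List.take_succ_cons, List.cons_append]
        have : n - (i + 1 + (k : Int)) = n - (i + ((k : Int) + 1)) := by ring
        rw [this]
        push_cast
        rfl

lemma pvCost_nonneg : ∀ (xs : List String), 0 ≤ pvCost xs := by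
  intro xs
  induction xs with
  | nil => simp [pvCost]
  | cons s r ih =>
    have : (0 : Int) ≤ PySem.Str.len s := by simp [PySem.Str.len_eq]
    simp only [pvCost]; omega

lemma pvCum_length : ∀ (xs : List String) (t : Int), (pvCum t xs).length = xs.length := by
  intro xs
  induction xs with
  | nil => intro t; simp [pvCum]
  | cons s r ih => intro t; simp [pvCum, ih]

-- every cumulative cost is at most the starting total plus the whole cost
lemma pvCum_le : ∀ (xs : List String) (t : Int), ∀ x ∈ pvCum t xs, x ≤ t + pvCost xs := by
  intro xs
  induction xs with
  | nil => intro t x hx; simp [pvCum] at hx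
  | cons s r ih =>
    intro t x hx
    simp only [pvCum, List.mem_cons] at hx
    have h0 := pvCost_nonneg r
    rcases hx with rfl | hx
    · simp only [pvCost]; omega
    · have := ih (t + PySem.Str.len s + 1) x hx
      simp only [pvCost]; omega

lemma pvCum_append : ∀ (xs ys : List String) (t : Int),
    pvCum t (xs ++ ys) = pvCum t xs ++ pvCum (t + pvCost xs) ys := by
  intro xs
  induction xs with
  | nil => intro ys t; simp [pvCum, pvCost]
  | cons s r ih =>
    intro ys t
    simp only [List.cons_append, pvCum, pvCost, ih]
    have : t + PySem.Str.len s + 1 + pvCost r = t + (PySem.Str.len s + 1 + pvCost r) := by ring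
    rw [this]

-- shifting the starting total shifts every cumulative cost
lemma pvCum_shift : ∀ (xs : List String) (t s : Int),
    pvCum (t + s) xs = (pvCum s xs).map (fun x => x + t) := by
  intro xs
  induction xs with
  | nil => intro t s; simp [pvCum]
  | cons l r ih =>
    intro t s
    have h1 : t + s + PySem.Str.len l + 1 = t + (s + PySem.Str.len l + 1) := by ring
    simp only [pvCum, List.map_cons, h1, ih]
    congr 1
    ring

-- splitting the prefix-sum count at any midpoint
lemma pvCountP_split (seg : List String) (mid : Nat) (hmid : mid ≤ seg.length) (budget : Int) :
    (pvCum 0 seg).countP (fun x => decide (x ≤ budget)) =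
      (if pvCost (seg.take mid) ≤ budget
       then mid + (pvCum 0 (seg.drop mid)).countP (fun x => decide (x ≤ budget - pvCost (seg.take mid)))
       else (pvCum 0 (seg.take mid)).countP (fun x => decide (x ≤ budget))) := by
  have hsplit : pvCum 0 seg =
      pvCum 0 (seg.take mid) ++ pvCum (0 + pvCost (seg.take mid)) (seg.drop mid) := by
    conv_lhs => rw [← List.take_append_drop mid seg]
    exact pvCum_append _ _ 0
  rw [hsplit, List.countP_append]
  by_cases hc : pvCost (seg.take mid) ≤ budget
  · have hleft : (pvCum 0 (seg.take mid)).countP (fun x => decide (x ≤ budget)) = mid := by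
      have hlen : (seg.take mid).length = mid := by simp [List.length_take]; omega
      have hfull : (pvCum 0 (seg.take mid)).countP (fun x => decide (x ≤ budget)) =
          (pvCum 0 (seg.take mid)).length := by
        apply List.countP_eq_length.mpr
        intro x hx
        have := pvCum_le (seg.take mid) 0 x hx
        simp only [decide_eq_true_eq]
        omega
      rw [hfull, pvCum_length, hlen]
    have hright : (pvCum (0 + pvCost (seg.take mid)) (seg.drop mid)).countP
          (fun x => decide (x ≤ budget)) =
        (pvCum 0 (seg.drop mid)).countP (fun x => decide (x ≤ budget - pvCost (seg.take mid))) := by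
      have h0 : (0 : Int) + pvCost (seg.take mid) = pvCost (seg.take mid) + 0 := by ring
      rw [h0, pvCum_shift, List.countP_map]
      apply List.countP_congr
      intro x _
      simp only [Function.comp_apply, decide_eq_true_eq]
      omega
    rw [if_pos hc, hleft, hright]
  · have hright : (pvCum (0 + pvCost (seg.take mid)) (seg.drop mid)).countP
          (fun x => decide (x ≤ budget)) = 0 := by
      apply List.countP_eq_zero.mpr
      intro x hx
      have := pvCum_gt (seg.drop mid) (0 + pvCost (seg.take mid)) x hx
      simp only [decide_eq_true_eq]
      omega
    rw [if_neg hc, hright, Nat.add_zero]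

-- the bisection computes exactly the number of prefix sums within budget
lemma pvCutoff_eq : ∀ (seg : List String) (budget : Int),
    pvCutoff seg budget = (pvCum 0 seg).countP (fun c => decide (c ≤ budget)) := by
  intro seg budget
  induction seg, budget using pvCutoff.induct with
  | case1 budget => simp [pvCutoff, pvCum]
  | case2 x budget h =>
    simp [pvCutoff, pvCum]
  | case3 x budget h =>
    simp [pvCutoff, pvCum]
  | case4 a b rest budget seg mid c h ih =>
    rw [pvCountP_split (a :: b :: rest) ((a :: b :: rest).length / 2) (Nat.div_le_self _ _) budget,
        if_pos h, ← ih]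
    simp only [pvCutoff]
    rw [if_pos h]
  | case5 a b rest budget seg mid c h ih =>
    rw [pvCountP_split (a :: b :: rest) ((a :: b :: rest).length / 2) (Nat.div_le_self _ _) budget,
        if_neg h, ← ih]
    simp only [pvCutoff]
    rw [if_neg h]

-- ===== VERDICT (by name: the statement is the Claim_ definition above) =====
theorem truncated_list_py_spec : Claim_equal_truncated_list_py := by
  intro lines limit _
  unfold Spec_truncated_list_py truncated_list_py truncated_list_py_alt
  rw [pvALoop_eq, pvCutoff_eq]
  simp only [PySem.List.len_eq]
  by_cases hk : (pvCum 0 lines).countP (fun c => decide (c ≤ limit)) = lines.length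
  · simp [hk]
  · simp only [if_neg hk]
    congr 2
    simp
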